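-- pv_equiv track=rewrite | github.com/timalo/Tietorakenteet-ja-Algoritmit | TRA/lopputyo.py | highestPath
-- ===== SOURCE A (Python) =====
-- def highestPath(path, MST):
-- 	"""Takes the final path and the original MST array with the path weight info.
-- 	Then finds the highest connection on the path.
-- 	"""
-- 	highest = 0
-- 	for i in range(len(path) - 1):
-- 		start = path[i]
-- 		end = path[i + 1]
-- 		for j in MST:													#Find the path weights from the MST array, time complexity for this could probably be way lower
-- 			if start == int(j[0]) and end == int(j[1]) or start == int(j[1]) and end == int(j[0]):
-- 				if int(j[2]) > highest:
-- 					highest = int(j[2])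
-- 	return highest
-- ===== SOURCE B (Python) =====
-- def highestPath(path, MST):
--     """Takes the final path and the original MST array with the path weight info.
--     Then finds the highest connection on the path.
--     """
--     edges = {(min(a, b), max(a, b)) for a, b in zip(path, path[1:])}
--     if not edges:
--         return 0
--     weights = [int(j[2]) for j in MST
--                if (min(int(j[0]), int(j[1])), max(int(j[0]), int(j[1]))) in edges]
--     return max([0] + weights)
-- ===== Notes on version B (the rewrite author's own statement) =====
-- stated objective: faster
-- what changed: A rescans all of MST for every consecutive path pair inside nested loops; B builds a set of normalized (min,max) path edges once and makes a single pass over MST collecting weights of rows whose normalized endpoints are in the set, returning max([0]+weights).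
import Mathlib
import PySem

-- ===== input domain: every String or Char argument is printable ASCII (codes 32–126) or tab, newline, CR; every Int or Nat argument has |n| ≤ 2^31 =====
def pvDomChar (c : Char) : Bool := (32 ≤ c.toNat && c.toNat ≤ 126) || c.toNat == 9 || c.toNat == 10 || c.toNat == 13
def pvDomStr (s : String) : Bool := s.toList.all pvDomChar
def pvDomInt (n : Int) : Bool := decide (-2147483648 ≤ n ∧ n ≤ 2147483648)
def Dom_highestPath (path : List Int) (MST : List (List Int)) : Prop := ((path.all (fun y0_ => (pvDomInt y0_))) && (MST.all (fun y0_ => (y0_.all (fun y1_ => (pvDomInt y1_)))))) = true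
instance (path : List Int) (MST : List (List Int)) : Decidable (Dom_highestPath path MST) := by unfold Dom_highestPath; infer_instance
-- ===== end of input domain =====

-- B replaces A's nested loops (scan MST once per path segment) by one precomputed set of
-- normalized path edges and a single pass over MST collecting matching weights.

-- ===== PORT A =====
def highestPath (path : List Int) (MST : List (List Int)) : Int :=
  (PySem.List.pyRange 0 ((path.length : Int) - 1) 1).foldl (fun highest i =>
    let start := PySem.List.pyGetD path i 0
    let stop := PySem.List.pyGetD path (i + 1) 0
    MST.foldl (fun h j =>
      if (start == PySem.List.pyGetD j 0 0 && stop == PySem.List.pyGetD j 1 0)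
          || (start == PySem.List.pyGetD j 1 0 && stop == PySem.List.pyGetD j 0 0) then
        if PySem.List.pyGetD j 2 0 > h then PySem.List.pyGetD j 2 0 else h
      else h) highest) 0

-- ===== PORT B =====
def highestPath_alt (path : List Int) (MST : List (List Int)) : Int :=
  let edges : PySem.Set (Int × Int) :=
    PySem.Set.ofList ((path.zip (PySem.List.slice path (some 1) none)).map
      (fun p => (min p.1 p.2, max p.1 p.2)))
  if edges.isEmpty then 0
  else
    let weights := (MST.filter (fun j =>
        PySem.Set.contains edges
          (min (PySem.List.pyGetD j 0 0) (PySem.List.pyGetD j 1 0),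
           max (PySem.List.pyGetD j 0 0) (PySem.List.pyGetD j 1 0)))).map
      (fun j => PySem.List.pyGetD j 2 0)
    (PySem.List.max? ((0 : Int) :: weights) (fun x => x)).getD 0

-- ===== PRECONDITION & SPEC =====
-- Pre_ excludes exactly the inputs where the Python A raises an IndexError: when the path has
-- at least one segment, every MST row must have length ≥ 2 (j[0], j[1] are read), and every
-- row matching a path segment must have length ≥ 3 (j[2] is read).
def Pre_highestPath (path : List Int) (MST : List (List Int)) : Prop :=
  path.zip path.tail ≠ [] →
    ∀ j ∈ MST, 2 ≤ j.length ∧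
      ((∃ p ∈ path.zip path.tail,
          (min p.1 p.2, max p.1 p.2) = (min (j.getD 0 0) (j.getD 1 0), max (j.getD 0 0) (j.getD 1 0)))
        → 3 ≤ j.length)
instance (path : List Int) (MST : List (List Int)) : Decidable (Pre_highestPath path MST) := by
  unfold Pre_highestPath; infer_instance

def pvWitness_highestPath : List Int × List (List Int) := ([1, 2], [[1, 2, 5]])

def Spec_highestPath (path : List Int) (MST : List (List Int)) (out : Int) : Prop := out = highestPath_alt path MST
instance (path : List Int) (MST : List (List Int)) (out : Int) : Decidable (Spec_highestPath path MST out) := by unfold Spec_highestPath; infer_instance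

-- ===== CLAIM (what is proved, stated in full; the proofs are below) =====
def Claim_equal_highestPath : Prop := ∀ (path : List Int) (MST : List (List Int)), Dom_highestPath path MST → Pre_highestPath path MST → Spec_highestPath path MST (highestPath path MST)

-- ===== LEMMAS AND PROOFS =====

lemma pv_ite_max (h x : Int) : (if x > h then x else h) = max h x := by
  rw [max_def]; split_ifs <;> omega

lemma pv_nested_fold {α : Type} (l : List α) (W : α → List Int) (h : Int) :
    l.foldl (fun h x => (W x).foldl max h) h = (l.flatMap W).foldl max h := by
  induction l generalizing h with
  | nil => rfl
  | cons a t ih => simp only [List.foldl_cons, List.flatMap_cons, List.foldl_append, ih]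

lemma pv_foldl_max_le {l1 l2 : List Int} (a : Int) (hsub : ∀ x ∈ l1, x ∈ l2) :
    l1.foldl max a ≤ l2.foldl max a := by
  rcases PySem.List.foldl_max_mem l1 a with h | h
  · rw [h]; exact (PySem.List.le_foldl_max l2 a).1
  · exact (PySem.List.le_foldl_max l2 a).2 _ (hsub _ h)

lemma pv_foldl_max_congr {l1 l2 : List Int} (a : Int) (hiff : ∀ x, x ∈ l1 ↔ x ∈ l2) :
    l1.foldl max a = l2.foldl max a :=
  le_antisymm (pv_foldl_max_le a fun x hx => (hiff x).1 hx)
    (pv_foldl_max_le a fun x hx => (hiff x).2 hx)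

lemma pv_minmax_iff (s t a b : Int) :
    (((s == a && t == b) || (s == b && t == a)) = true) ↔
      ((min s t, max s t) = (min a b, max a b)) := by
  simp only [Bool.or_eq_true, Bool.and_eq_true, beq_iff_eq, Prod.mk.injEq]
  omega

lemma pv_inner (MST : List (List Int)) (s e h : Int) :
    MST.foldl (fun h j =>
      if (s == PySem.List.pyGetD j 0 0 && e == PySem.List.pyGetD j 1 0)
          || (s == PySem.List.pyGetD j 1 0 && e == PySem.List.pyGetD j 0 0) then
        max h (PySem.List.pyGetD j 2 0)
      else h) h
    = ((MST.filter (fun j =>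
        (s == PySem.List.pyGetD j 0 0 && e == PySem.List.pyGetD j 1 0)
          || (s == PySem.List.pyGetD j 1 0 && e == PySem.List.pyGetD j 0 0))).map
        (fun j => PySem.List.pyGetD j 2 0)).foldl max h := by
  rw [PySem.List.foldl_if_eq_foldl_filter, List.foldl_map]

lemma pv_zip_get (path : List Int) (i : Nat) (h : i + 1 < path.length) :
    (path.zip path.tail)[i]'(by simp [List.length_tail]; omega)
      = (path[i]'(by omega), path[i + 1]'h) := by
  rw [List.getElem_zip]
  congr 1
  exact List.getElem_tail _

lemma pv_edge_iff (path : List Int) (q : Int × Int) :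
    (∃ i, (0 ≤ i ∧ i < (path.length : Int) - 1) ∧
      (min (PySem.List.pyGetD path i 0) (PySem.List.pyGetD path (i + 1) 0),
       max (PySem.List.pyGetD path i 0) (PySem.List.pyGetD path (i + 1) 0)) = q)
    ↔ ∃ p ∈ path.zip path.tail, (min p.1 p.2, max p.1 p.2) = q := by
  constructor
  · rintro ⟨i, ⟨h0, hlt⟩, hq⟩
    lift i to ℕ using h0
    have hk1 : i + 1 < path.length := by omega
    have hzlen : i < (path.zip path.tail).length := by
      simp [List.length_zip, List.length_tail]; omega
    refine ⟨(path[i]'(by omega), path[i + 1]'hk1), ?_, ?_⟩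
    · rw [List.mem_iff_getElem]
      exact ⟨i, hzlen, pv_zip_get path i hk1⟩
    · rw [← hq]
      have e1 : PySem.List.pyGetD path (i : Int) 0 = path[i]'(by omega) := by
        rw [PySem.List.pyGetD_natCast, List.getD_eq_getElem _ _ (by omega)]
      have e2 : PySem.List.pyGetD path ((i : Int) + 1) 0 = path[i + 1]'hk1 := by
        have hcast : ((i : Int) + 1) = ((i + 1 : ℕ) : Int) := by push_cast; ring
        rw [hcast, PySem.List.pyGetD_natCast, List.getD_eq_getElem _ _ hk1]
      rw [e1, e2]
  · rintro ⟨p, hp, hq⟩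
    obtain ⟨k, hk, hget⟩ := List.mem_iff_getElem.mp hp
    have hk1 : k + 1 < path.length := by
      simp [List.length_zip, List.length_tail] at hk; omega
    refine ⟨(k : Int), ⟨by positivity, by omega⟩, ?_⟩
    have e1 : PySem.List.pyGetD path (k : Int) 0 = path[k]'(by omega) := by
      rw [PySem.List.pyGetD_natCast, List.getD_eq_getElem _ _ (by omega)]
    have e2 : PySem.List.pyGetD path ((k : Int) + 1) 0 = path[k + 1]'hk1 := by
      have hcast : ((k : Int) + 1) = ((k + 1 : ℕ) : Int) := by push_cast; ring
      rw [hcast, PySem.List.pyGetD_natCast, List.getD_eq_getElem _ _ hk1]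
    rw [e1, e2, ← hq, ← hget, pv_zip_get path k hk1]

-- ===== VERDICT (by name: the statement is the Claim_ definition above) =====
theorem highestPath_spec : Claim_equal_highestPath := by
  intro path MST _ _
  unfold Spec_highestPath highestPath highestPath_alt
  rw [PySem.List.slice_from_one]
  by_cases hz : path.zip path.tail = []
  · have hlen : (path.length : Int) - 1 ≤ 0 := by
      rcases List.zip_eq_nil_iff.mp hz with h | h
      · simp [h]
      · cases path with
        | nil => simp
        | cons a t => simp at h; simp [h]
    rw [PySem.List.pyRange_one_eq_nil hlen, hz]
    simp [PySem.Set.ofList]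
  · have hne : ((path.zip path.tail).map (fun p => (min p.1 p.2, max p.1 p.2))) ≠ [] := by
      simp [hz]
    have hsetne : PySem.Set.ofList
        ((path.zip path.tail).map (fun p => (min p.1 p.2, max p.1 p.2))) ≠ [] := by
      intro hcontra
      obtain ⟨x, hx⟩ := List.exists_mem_of_ne_nil _ hne
      have := (PySem.Set.mem_ofList _ _).mpr hx
      rw [hcontra] at this
      exact List.not_mem_nil this
    simp only [List.isEmpty_iff, hsetne, if_false]
    rw [PySem.List.max?_id_cons, Option.getD_some]
    simp only [pv_ite_max, pv_inner]
    rw [pv_nested_fold]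
    apply pv_foldl_max_congr
    intro x
    simp only [List.mem_flatMap, List.mem_map, List.mem_filter, PySem.List.mem_pyRange_one]
    constructor
    · rintro ⟨i, hi, j, ⟨hjmem, hcond⟩, hw⟩
      refine ⟨j, ⟨hjmem, ?_⟩, hw⟩
      rw [PySem.Set.contains_iff, PySem.Set.mem_ofList]
      rw [List.mem_map]
      rw [pv_minmax_iff] at hcond
      obtain ⟨p, hp, hpq⟩ := (pv_edge_iff path _).mp ⟨i, hi, hcond⟩
      exact ⟨p, hp, hpq⟩
    · rintro ⟨j, ⟨hjmem, hcond⟩, hw⟩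
      rw [PySem.Set.contains_iff, PySem.Set.mem_ofList, List.mem_map] at hcond
      obtain ⟨i, hi, hiq⟩ := (pv_edge_iff path _).mpr hcond
      exact ⟨i, hi, j, ⟨hjmem, (pv_minmax_iff _ _ _ _).mpr hiq⟩, hw⟩
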